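-- pv_equiv track=rewrite | github.com/prastunlp/DualDec | utils/loader.py | get_nearest_start_position
-- ===== SOURCE A (Python) =====
-- def get_nearest_start_position(S1):
--     nearest_start_list = []
--     current_distance_list = []
--     for start_pos_list in S1:
--         nearest_start_pos = []
--         current_start_pos = 0
--         current_pos = []
--         flag = False
--         for i, start_label in enumerate(start_pos_list):
--             if start_label > 0:
--                 current_start_pos = i
--                 flag = True
--             nearest_start_pos.append(current_start_pos)
--             if flag > 0:
--                 if i-current_start_pos > 10:
--                     current_pos.append(499)
--                 else:
--                     current_pos.append(i-current_start_pos)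
--             else:
--                 current_pos.append(499)
--         nearest_start_list.append(nearest_start_pos)
--         current_distance_list.append(current_pos)
--     return nearest_start_list, current_distance_list
-- ===== SOURCE B (Python) =====
-- def get_nearest_start_position(S1):
--     nearest_start_list = []
--     current_distance_list = []
--     for row in S1:
--         j = next((i for i, lab in enumerate(row) if lab > 0), None)
--         if j is None:
--             nearest, dist = [0] * len(row), [499] * len(row)
--         else:
--             nearest, dist = [0] * j, [499] * j
--             base = j
--             # row[base] carries a positive label at every iteration; emit the
--             # whole segment up to the next positive label by block replication
--             while base < len(row):
--                 k = base + 1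
--                 while k < len(row) and row[k] <= 0:
--                     k += 1
--                 nearest += [base] * (k - base)
--                 dist += [d if d <= 10 else 499 for d in range(k - base)]
--                 base = k
--         nearest_start_list.append(nearest)
--         current_distance_list.append(dist)
--     return nearest_start_list, current_distance_list
-- ===== Notes on version B (the rewrite author's own statement) =====
-- stated objective: alternative
-- what changed: Replaces A's element-by-element loop with carried state (current_start_pos, flag) by a segment-block construction: find the first start index, then walk from start to next start emitting each whole inter-start segment at once by block replication ([base]*(k-base)) and a range comprehension.
import Mathlib
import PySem

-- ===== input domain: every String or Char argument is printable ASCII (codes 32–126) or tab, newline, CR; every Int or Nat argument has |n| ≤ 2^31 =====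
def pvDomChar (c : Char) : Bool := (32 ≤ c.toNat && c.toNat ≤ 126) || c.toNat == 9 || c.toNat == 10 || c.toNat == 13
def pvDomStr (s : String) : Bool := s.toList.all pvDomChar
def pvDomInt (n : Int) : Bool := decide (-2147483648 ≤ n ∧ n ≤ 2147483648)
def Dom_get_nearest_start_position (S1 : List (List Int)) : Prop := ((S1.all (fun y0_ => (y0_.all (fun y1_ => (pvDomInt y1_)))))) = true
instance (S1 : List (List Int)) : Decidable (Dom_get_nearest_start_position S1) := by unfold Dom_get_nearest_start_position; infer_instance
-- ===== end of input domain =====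

-- B replaces A's per-element loop with carried state by a divide-and-conquer segment
-- construction: find the start positions and emit each inter-start segment wholesale by
-- block replication; objective: alternative (same cost, different algorithm shape).


-- ===== PORT A =====
-- A's inner loop: state (current_start_pos, flag, nearest_start_pos, current_pos)
def rowA_step (st : Int × Bool × List Int × List Int) (p : Int × Int) :
    Int × Bool × List Int × List Int :=
  let (cur, flag) := if p.2 > 0 then (p.1, true) else (st.1, st.2.1)
  let ns := st.2.2.1 ++ [cur]
  let cp := st.2.2.2 ++
    [if flag then (if p.1 - cur > 10 then 499 else p.1 - cur) else 499]
  (cur, flag, ns, cp)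

def rowA (row : List Int) : List Int × List Int :=
  let r := (PySem.List.enumerate row).foldl rowA_step (0, false, [], [])
  (r.2.2.1, r.2.2.2)

def get_nearest_start_position (S1 : List (List Int)) : List (List Int) × List (List Int) :=
  S1.foldl (fun acc row => (acc.1 ++ [(rowA row).1], acc.2 ++ [(rowA row).2])) ([], [])

-- ===== PORT B =====
-- B's while loop 'k = 1; while k < len(row) and row[k] <= 0: k += 1' over row = _ :: t:
-- k = 1 + (length of the maximal nonpositive prefix of t), computed structurally.
def skipNonPos : List Int → Nat
  | [] => 0
  | x :: t => if x ≤ 0 then 1 + skipNonPos t else 0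

-- B's outer while loop over the remaining suffix rest = row[base:]; rest's head
-- carries a positive label; the inner while 'k = base+1; while k < len(row) and
-- row[k] <= 0: k += 1' computes k - base = 1 + (nonpositive prefix of the tail),
-- via skipNonPos; each iteration appends one whole segment block to the accumulators.
def segLoop (rest : List Int) (base : Int) (near dist : List Int) : List Int × List Int :=
  match rest with
  | [] => (near, dist)
  | _ :: t =>
    let k := 1 + skipNonPos t
    segLoop (t.drop (k - 1)) (base + (k : Int))
      (near ++ List.replicate k base)
      (dist ++ (PySem.List.pyRange 0 (k : Int) 1).map (fun d => if d ≤ 10 then d else 499))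
  termination_by rest.length
  decreasing_by simp

-- first start index: next((i for i, lab in enumerate(row) if lab > 0), None)
def rowB (row : List Int) : List Int × List Int :=
  match (PySem.List.enumerate row).find? (fun p => decide (p.2 > 0)) with
  | none => (List.replicate row.length 0, List.replicate row.length 499)
  | some p =>
    -- p.1 is an enumerate index, hence nonnegative: .toNat is exact here
    let j := p.1.toNat
    segLoop (row.drop j) p.1 (List.replicate j 0) (List.replicate j 499)

def get_nearest_start_position_alt (S1 : List (List Int)) : List (List Int) × List (List Int) :=
  S1.foldl (fun acc row => (acc.1 ++ [(rowB row).1], acc.2 ++ [(rowB row).2])) ([], [])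

-- ===== PRECONDITION & SPEC =====
def Spec_get_nearest_start_position (S1 : List (List Int)) (out : List (List Int) × List (List Int)) : Prop := out = get_nearest_start_position_alt S1
instance (S1 : List (List Int)) (out : List (List Int) × List (List Int)) : Decidable (Spec_get_nearest_start_position S1 out) := by unfold Spec_get_nearest_start_position; infer_instance

-- ===== CLAIM (what is proved, stated in full; the proofs are below) =====
def Claim_equal_get_nearest_start_position : Prop := ∀ (S1 : List (List Int)), Dom_get_nearest_start_position S1 → Spec_get_nearest_start_position S1 (get_nearest_start_position S1)

-- ===== LEMMAS AND PROOFS =====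

-- proof-side recursive view of segLoop: one segment block, then the rest
def segments (row : List Int) (base : Int) : List Int × List Int :=
  match row with
  | [] => ([], [])   -- unreachable: _segments is only called on nonempty rows
  | _ :: t =>
    let k := 1 + skipNonPos t
    let near := List.replicate k base
    let dist := (PySem.List.pyRange 0 (k : Int) 1).map (fun d => if d ≤ 10 then d else 499)
    if k < t.length + 1 then
      let r := segments (t.drop (k - 1)) (base + (k : Int))  -- row[k:] = t[(k-1):]
      (near ++ r.1, dist ++ r.2)
    else (near, dist)
  termination_by row.length
  decreasing_by simp

-- the nearest-start list produced from index s with carried value cur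
def nlSpec (row : List Int) (s cur : Int) : List Int :=
  match row with
  | [] => []
  | lab :: t => let c := if lab > 0 then s else cur; c :: nlSpec t (s + 1) c

-- the final first-start index from index s with carried value first
def foSpec (row : List Int) (s : Int) (first : Option Int) : Option Int :=
  match row with
  | [] => first
  | lab :: t => foSpec t (s + 1) (if lab > 0 ∧ first = none then some s else first)

-- the distance entry as a function of the first-start index and (position, nearest)
def entrySpec (first : Option Int) (p : Int × Int) : Int :=
  match first with
  | none => 499
  | some f => if p.1 < f then 499 else if p.1 - p.2 > 10 then 499 else p.1 - p.2

theorem foSpec_some (t : List Int) (s f : Int) : foSpec t s (some f) = some f := by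
  induction t generalizing s with
  | nil => rfl
  | cons lab t ih => simp [foSpec, ih]

theorem foSpec_none_ge (t : List Int) (s f : Int) (h : foSpec t s none = some f) : s ≤ f := by
  induction t generalizing s with
  | nil => simp [foSpec] at h
  | cons lab t ih =>
    by_cases hl : lab > 0
    · simp [foSpec, hl, foSpec_some] at h; omega
    · simp [foSpec, hl] at h; have := ih (s + 1) h; omega

theorem rowA_main (row : List Int) (s cur : Int) (first : Option Int)
    (ns0 cp0 : List Int) (hf : ∀ f, first = some f → f ≤ s) :
    (let r := (PySem.List.enumerate row s).foldl rowA_step (cur, first.isSome, ns0, cp0)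
     (r.2.2.1, r.2.2.2))
    = (ns0 ++ nlSpec row s cur,
       cp0 ++ (PySem.List.enumerate (nlSpec row s cur) s).map (entrySpec (foSpec row s first))) := by
  induction row generalizing s cur first ns0 cp0 with
  | nil => simp [PySem.List.enumerate_nil, nlSpec, foSpec]
  | cons lab t ih =>
    rw [PySem.List.enumerate_cons]
    simp only [List.foldl_cons]
    set cur' : Int := if lab > 0 then s else cur with hcur'
    set first' : Option Int := if lab > 0 ∧ first = none then some s else first with hfirst'
    have hflag : (if lab > 0 then (s, true) else (cur, first.isSome)) = (cur', first'.isSome) := by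
      by_cases hl : lab > 0
      · simp [hl, hcur', hfirst']
        cases first <;> simp
      · simp [hl, hcur', hfirst']
    have hstep : rowA_step (cur, first.isSome, ns0, cp0) (s, lab)
        = (cur', first'.isSome, ns0 ++ [cur'],
           cp0 ++ [if first'.isSome then (if s - cur' > 10 then 499 else s - cur') else 499]) := by
      simp only [rowA_step, hflag]
    rw [hstep]
    have hf' : ∀ f, first' = some f → f ≤ s + 1 := by
      intro f hff
      by_cases hl : lab > 0 ∧ first = none
      · simp [hfirst', hl] at hff; omega
      · simp [hfirst', hl] at hff; have := hf f hff; omega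
    have := ih (s + 1) cur' first' (ns0 ++ [cur'])
      (cp0 ++ [if first'.isSome then (if s - cur' > 10 then 499 else s - cur') else 499]) hf'
    simp only at this ⊢
    rw [this]
    have hnl : nlSpec (lab :: t) s cur = cur' :: nlSpec t (s + 1) cur' := by
      simp [nlSpec, hcur']
    have hfo : foSpec (lab :: t) s first = foSpec t (s + 1) first' := by
      simp [foSpec, hfirst']
    rw [hnl, hfo, PySem.List.enumerate_cons]
    simp only [List.map_cons, List.append_assoc, List.cons_append]
    have hentry : (if first'.isSome then (if s - cur' > 10 then 499 else s - cur') else 499)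
        = entrySpec (foSpec t (s + 1) first') (s, cur') := by
      by_cases hl : lab > 0
      · have hc : cur' = s := by simp [hcur', hl]
        rcases hg : first' with _ | g
        · exfalso
          by_cases hn : first = none <;> simp [hfirst', hl, hn] at hg
        · have hgle : g ≤ s := by
            by_cases hn : first = none
            · simp [hfirst', hl, hn] at hg; omega
            · simp [hfirst', hl, hn] at hg; exact hf g (hg ▸ rfl)
          rw [foSpec_some]
          simp [entrySpec, hc]
          omega
      · have hfeq : first' = first := by simp [hfirst', hl]
        rcases hfst : first with _ | f
        · simp only [hfeq, hfst, Option.isSome_none, Bool.false_eq_true, if_false]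
          rcases hF : foSpec t (s + 1) none with _ | g
          · simp [entrySpec]
          · have := foSpec_none_ge t (s + 1) g hF
            simp [entrySpec]; omega
        · have hfle : f ≤ s := hf f hfst
          rw [hfeq, hfst, foSpec_some]
          have hc : cur' = cur := by simp [hcur', hl]
          simp [entrySpec]
          omega
    rw [hentry]
    simp

-- carried values pass unchanged through an all-nonpositive list
theorem nlSpec_nonpos (a : List Int) (s cur : Int) (ha : ∀ y ∈ a, y ≤ 0) :
    nlSpec a s cur = List.replicate a.length cur := by
  induction a generalizing s with
  | nil => rfl
  | cons x t ih =>
    have hx : ¬ x > 0 := by have := ha x (by simp); omega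
    simp [nlSpec, hx, List.replicate_succ, ih (s + 1) (fun y hy => ha y (by simp [hy]))]

theorem nlSpec_nonpos_append (a b : List Int) (s cur : Int) (ha : ∀ y ∈ a, y ≤ 0) :
    nlSpec (a ++ b) s cur = List.replicate a.length cur ++ nlSpec b (s + a.length) cur := by
  induction a generalizing s with
  | nil => simp
  | cons x t ih =>
    have hx : ¬ x > 0 := by have := ha x (by simp); omega
    simp only [List.cons_append, nlSpec, hx, if_false, List.length_cons, List.replicate_succ]
    rw [ih (s + 1) (fun y hy => ha y (by simp [hy]))]
    simp; ring_nf

theorem foSpec_nonpos_append (a b : List Int) (s : Int) (ha : ∀ y ∈ a, y ≤ 0) :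
    foSpec (a ++ b) s none = foSpec b (s + a.length) none := by
  induction a generalizing s with
  | nil => simp
  | cons x t ih =>
    have hx : ¬ (x > 0) := by have := ha x (by simp); omega
    simp only [List.cons_append, foSpec, hx, false_and, if_false]
    rw [ih (s + 1) (fun y hy => ha y (by simp [hy]))]
    simp; ring_nf

-- mapping over the enumeration of a replicated block
theorem map_enum_replicate {g : Int × Int → Int} (k : Nat) (c s : Int) :
    (PySem.List.enumerate (List.replicate k c) s).map g
      = (List.range k).map (fun d : Nat => g (s + (d : Int), c)) := by
  induction k with
  | zero => simp [PySem.List.enumerate_nil]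
  | succ n ih =>
    rw [List.replicate_succ', PySem.List.enumerate_append, List.range_succ]
    simp [ih, PySem.List.enumerate_cons, PySem.List.enumerate_nil]

theorem pyRange_zero_map (n : Nat) :
    PySem.List.pyRange 0 (n : Int) 1 = (List.range n).map (fun k : Nat => (k : Int)) := by
  rw [PySem.List.pyRange_zero_nat]

-- facts about skipNonPos
theorem skipNonPos_le (t : List Int) : skipNonPos t ≤ t.length := by
  induction t with
  | nil => simp [skipNonPos]
  | cons x t ih => by_cases hx : x ≤ 0 <;> simp [skipNonPos, hx] <;> omega

theorem skipNonPos_take (t : List Int) : ∀ y ∈ t.take (skipNonPos t), y ≤ 0 := by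
  induction t with
  | nil => simp
  | cons x t ih =>
    by_cases hx : x ≤ 0
    · simp only [skipNonPos, hx, if_pos]
      intro y hy
      rw [show 1 + skipNonPos t = skipNonPos t + 1 by omega, List.take_succ_cons] at hy
      rcases List.mem_cons.mp hy with h | h
      · omega
      · exact ih y h
    · simp [skipNonPos, hx]

theorem skipNonPos_stop (t : List Int) (h : skipNonPos t < t.length) :
    ∃ x t', t.drop (skipNonPos t) = x :: t' ∧ x > 0 := by
  induction t with
  | nil => simp at h
  | cons x t ih =>
    by_cases hx : x ≤ 0
    · simp only [skipNonPos, hx, if_pos] at h ⊢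
      rw [show 1 + skipNonPos t = skipNonPos t + 1 by omega] at h ⊢
      simp only [List.length_cons] at h
      obtain ⟨y, t', hd, hy⟩ := ih (by omega)
      exact ⟨y, t', by simpa [List.drop_succ_cons] using hd, hy⟩
    · exact ⟨x, t, by simp [skipNonPos, hx], by omega⟩

-- the distance block emitted for one segment equals the spec's entries there
theorem dist_block (k : Nat) (base f : Int) (hf : f ≤ base) :
    (PySem.List.enumerate (List.replicate k base) base).map (entrySpec (some f))
      = (PySem.List.pyRange 0 (k : Int) 1).map (fun d => if d ≤ 10 then d else 499) := by
  rw [map_enum_replicate, pyRange_zero_map, List.map_map]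
  apply List.map_congr_left
  intro d _
  simp only [Function.comp, entrySpec]
  split_ifs <;> omega

-- the 499-prefix before the first start equals the spec's entries there
theorem dist_prefix (k : Nat) (f : Int) (hf : (k : Int) ≤ f) :
    (PySem.List.enumerate (List.replicate k 0) 0).map (entrySpec (some f))
      = List.replicate k 499 := by
  rw [map_enum_replicate]
  rw [List.map_congr_left (g := fun _ => (499 : Int))
    (by intro d hd; rw [List.mem_range] at hd; simp only [entrySpec]; split_ifs <;> omega)]
  simp

-- the main segment lemma: segments equals the spec on a head-positive row
theorem segments_main (x : Int) (t : List Int) (base cur f : Int)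
    (hx : x > 0) (hf : f ≤ base) :
    segments (x :: t) base
      = (nlSpec (x :: t) base cur,
         (PySem.List.enumerate (nlSpec (x :: t) base cur) base).map (entrySpec (some f))) := by
  have hm := skipNonPos_le t
  have htake := skipNonPos_take t
  have hlen : (t.take (skipNonPos t)).length = skipNonPos t := by
    rw [List.length_take]; omega
  have hnl : nlSpec (x :: t) base cur
      = List.replicate (1 + skipNonPos t) base
        ++ nlSpec (t.drop (skipNonPos t)) (base + (1 + skipNonPos t : Nat)) base := by
    have h1 : nlSpec (x :: t) base cur = base :: nlSpec t (base + 1) base := by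
      simp [nlSpec, hx]
    rw [h1]
    conv_lhs => rw [← List.take_append_drop (skipNonPos t) t]
    rw [nlSpec_nonpos_append _ _ _ _ htake, hlen]
    rw [show 1 + skipNonPos t = skipNonPos t + 1 by omega, List.replicate_succ]
    simp only [List.cons_append]
    congr 2
    push_cast
    ring
  by_cases h : skipNonPos t < t.length
  · obtain ⟨y, t'', hd, hy⟩ := skipNonPos_stop t h
    have hlt : t''.length < t.length := by
      have := congrArg List.length hd
      simp [List.length_drop] at this
      omega
    rw [segments]
    simp only [show 1 + skipNonPos t < t.length + 1 by omega, if_pos,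
      show 1 + skipNonPos t - 1 = skipNonPos t by omega]
    rw [hd]
    rw [segments_main y t'' (base + ((1 + skipNonPos t : Nat) : Int)) base f hy (by omega)]
    rw [hnl, hd]
    rw [PySem.List.enumerate_append, List.map_append]
    simp only [List.length_replicate]
    rw [dist_block _ _ _ hf]
  · have hall : skipNonPos t = t.length := by omega
    have hdrop : t.drop (skipNonPos t) = [] := by
      rw [hall, List.drop_length]
    rw [segments]
    simp only [show ¬ (1 + skipNonPos t < t.length + 1) by omega, if_false]
    rw [hnl, hdrop]
    simp only [nlSpec, List.append_nil]
    rw [dist_block _ _ _ hf]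
  termination_by t.length
  decreasing_by exact hlt

-- the iterative accumulator loop equals the recursive segment view
theorem segLoop_eq (rest : List Int) (base : Int) (near dist : List Int) :
    segLoop rest base near dist
      = (near ++ (segments rest base).1, dist ++ (segments rest base).2) := by
  match rest with
  | [] => simp [segLoop, segments]
  | x :: t =>
    rw [segLoop]
    rw [segLoop_eq (t.drop (1 + skipNonPos t - 1)) (base + ((1 + skipNonPos t : Nat) : Int))]
    rw [segments]
    by_cases h : 1 + skipNonPos t < t.length + 1
    · simp only [h, if_pos, List.append_assoc]
    · have hd : t.drop (1 + skipNonPos t - 1) = [] := by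
        have := skipNonPos_le t
        apply List.drop_eq_nil_of_le
        omega
      simp only [h, if_false, hd, segments, List.append_nil]
  termination_by rest.length
  decreasing_by simp

-- extracting the split at the first positive label from find?
theorem find_some_split (row : List Int) (s : Int) (p : Int × Int)
    (h : (PySem.List.enumerate row s).find? (fun q => decide (q.2 > 0)) = some p) :
    ∃ a x t, row = a ++ x :: t ∧ (∀ y ∈ a, y ≤ 0) ∧ x > 0 ∧ p.1 = s + a.length := by
  induction row generalizing s with
  | nil => simp [PySem.List.enumerate_nil] at h
  | cons z t ih =>
    rw [PySem.List.enumerate_cons] at h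
    by_cases hz : z > 0
    · rw [List.find?_cons_of_pos (by simpa using hz)] at h
      refine ⟨[], z, t, by simp, by simp, hz, ?_⟩
      simp [← Option.some_inj.mp h]
    · rw [List.find?_cons_of_neg (by simpa using hz)] at h
      obtain ⟨a, x, t', heq, ha, hx, hp⟩ := ih (s + 1) h
      refine ⟨z :: a, x, t', by simp [heq], ?_, hx, ?_⟩
      · intro y hy
        rcases List.mem_cons.mp hy with hy | hy
        · omega
        · exact ha y hy
      · simp only [hp, List.length_cons]; push_cast; ring
    
theorem find_none_all (row : List Int) (s : Int)
    (h : (PySem.List.enumerate row s).find? (fun q => decide (q.2 > 0)) = none) :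
    ∀ y ∈ row, y ≤ 0 := by
  intro y hy
  rw [List.find?_eq_none] at h
  have hy' : y ∈ (PySem.List.enumerate row s).map (fun q => q.2) := by
    rw [PySem.List.map_snd_enumerate]; exact hy
  obtain ⟨q, hq, hq2⟩ := List.mem_map.mp hy'
  have := h q hq
  simp [hq2] at this
  omega

theorem rowA_eq_rowB (row : List Int) : rowA row = rowB row := by
  have hA := rowA_main row 0 0 none [] [] (by intro f h; cases h)
  simp only at hA
  have hA' : (((PySem.List.enumerate row 0).foldl rowA_step (0, false, [], [])).2.2.1,
              ((PySem.List.enumerate row 0).foldl rowA_step (0, false, [], [])).2.2.2)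
      = ([] ++ nlSpec row 0 0,
         [] ++ (PySem.List.enumerate (nlSpec row 0 0) 0).map (entrySpec (foSpec row 0 none))) := hA
  rw [Prod.mk.injEq] at hA'
  have hAeq : rowA row
      = (nlSpec row 0 0,
         (PySem.List.enumerate (nlSpec row 0 0) 0).map (entrySpec (foSpec row 0 none))) := by
    simp only [rowA]
    rw [hA'.1, hA'.2]
    simp
  rw [hAeq]
  unfold rowB
  split
  · next hfind =>
      have hall := find_none_all row 0 hfind
      have hfo : foSpec row 0 none = none := by
        have := foSpec_nonpos_append row [] 0 hall
        simpa [foSpec] using this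
      have hnl : nlSpec row 0 0 = List.replicate row.length 0 := nlSpec_nonpos row 0 0 hall
      rw [hfo, hnl]
      rw [show (entrySpec none) = (fun _ : Int × Int => (499 : Int)) from rfl]
      simp [PySem.List.length_enumerate]
  · next p hfind =>
      dsimp only
      obtain ⟨a, x, t, heq, ha, hx, hp⟩ := find_some_split row 0 p hfind
      have hp1 : p.1 = (a.length : Int) := by omega
      subst heq
      rw [hp1, Int.toNat_natCast, List.drop_left, segLoop_eq]
      rw [segments_main x t (a.length : Int) 0 (a.length : Int) hx (le_refl _)]
      have hfo : foSpec (a ++ x :: t) 0 none = some (a.length : Int) := by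
        rw [foSpec_nonpos_append _ _ _ ha]
        simp [foSpec, hx, foSpec_some]
      have hnl : nlSpec (a ++ x :: t) 0 0
          = List.replicate a.length 0 ++ nlSpec (x :: t) (a.length : Int) 0 := by
        rw [nlSpec_nonpos_append _ _ _ _ ha]
        simp
      rw [hfo, hnl, PySem.List.enumerate_append, List.map_append]
      simp only [List.length_replicate]
      rw [dist_prefix _ _ (le_refl _)]
      simp

-- ===== VERDICT (by name: the statement is the Claim_ definition above) =====
theorem get_nearest_start_position_spec : Claim_equal_get_nearest_start_position := by
  intro S1 _
  unfold Spec_get_nearest_start_position get_nearest_start_position get_nearest_start_position_alt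
  simp only [rowA_eq_rowB]
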